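-- pv_equiv track=rewrite | github.com/min1378/-algorithm | line/5.py | solution
-- ===== SOURCE A (Python) =====
-- def solution(dataSource, tags):
--     answer = []
--     dic = {}
--     for data in dataSource:
--         dic[data[0]] = 0
--         for i in range(1, len(data)):
--             if data[i] in tags:
--                 dic[data[0]] += 1
--     dic = {key: value for key, value in dic.items() if value != 0}
--     sorted_list = sorted(dic.items(), key=lambda x: x[1], reverse=True)
--     if len(sorted_list) > 10:
--         sorted_list = sorted_list[:10]
--
--     for el in sorted_list:
--         answer.append(el[0])
--     return answer
-- ===== SOURCE B (Python) =====
-- def solution(dataSource, tags):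
--     tagset = set(tags)
--     counts = {}
--     for data in dataSource:
--         counts[data[0]] = sum(1 for x in data[1:] if x in tagset)
--     buckets = {}
--     for key, c in counts.items():
--         if c != 0:
--             buckets[c] = buckets.get(c, []) + [key]
--     ordered = [k for c in sorted(buckets, reverse=True) for k in buckets[c]]
--     return ordered[:10]
-- ===== Notes on version B (the rewrite author's own statement) =====
-- stated objective: faster
-- what changed: B computes each record's count in one expression over data[1:] using a set of tags (O(1) membership instead of A's O(t) list scan per element) and replaces A's per-index dict-increment loop plus full stable reverse sort of the surviving (id, count) pairs by count-keyed buckets emitted in decreasing count order.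
import Mathlib
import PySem

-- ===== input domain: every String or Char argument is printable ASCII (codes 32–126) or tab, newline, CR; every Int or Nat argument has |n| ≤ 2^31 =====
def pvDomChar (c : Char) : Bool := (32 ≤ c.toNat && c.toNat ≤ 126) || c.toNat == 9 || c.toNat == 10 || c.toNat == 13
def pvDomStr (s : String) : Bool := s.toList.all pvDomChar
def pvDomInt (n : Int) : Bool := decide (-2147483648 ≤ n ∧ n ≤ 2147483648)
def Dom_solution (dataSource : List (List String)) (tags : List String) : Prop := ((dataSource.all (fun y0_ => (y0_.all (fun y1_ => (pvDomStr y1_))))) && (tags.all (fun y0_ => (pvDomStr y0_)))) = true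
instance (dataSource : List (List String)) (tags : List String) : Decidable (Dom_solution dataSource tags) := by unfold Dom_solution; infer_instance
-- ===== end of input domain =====

-- B counts tag matches with a set of tags and replaces A's stable reverse sort of the surviving
-- (id, count) pairs by count-keyed buckets emitted in decreasing count order (objective: faster; measured).

-- ===== PORT A =====
def aDict (dataSource : List (List String)) (tags : List String) : PySem.Dict String Int :=
  dataSource.foldl (fun d data =>
    (PySem.List.pyRange 1 (PySem.List.len data)).foldl
      (fun d i =>
        if tags.contains (PySem.List.pyGetD data i "") then
          d.insert (PySem.List.pyGetD data 0 "") (d.getD (PySem.List.pyGetD data 0 "") 0 + 1)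
        else d)
      (d.insert (PySem.List.pyGetD data 0 "") 0)) PySem.Dict.empty

def solution (dataSource : List (List String)) (tags : List String) : List String :=
  let dic := PySem.Dict.ofList ((aDict dataSource tags).items.filter (fun p => decide (p.2 ≠ 0)))
  let sorted_list := PySem.List.sorted dic.items (fun x => x.2) true
  let sorted_list := if 10 < sorted_list.length then PySem.List.slice sorted_list none (some 10) else sorted_list
  sorted_list.foldl (fun answer el => answer ++ [el.1]) []

-- ===== PORT B =====
def bCounts (dataSource : List (List String)) (tagset : PySem.Set String) : PySem.Dict String Int :=
  dataSource.foldl (fun d data =>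
    d.insert (PySem.List.pyGetD data 0 "")
      ((PySem.List.slice data (some 1) none).foldl
        (fun acc x => if PySem.Set.contains tagset x then acc + 1 else acc) (0 : Int)))
    PySem.Dict.empty

def bBuckets (counts : PySem.Dict String Int) : PySem.Dict Int (List String) :=
  counts.items.foldl
    (fun b p => if p.2 ≠ 0 then b.modify p.2 [] (fun l => l ++ [p.1]) else b)
    PySem.Dict.empty

def solution_alt (dataSource : List (List String)) (tags : List String) : List String :=
  let tagset := PySem.Set.ofList tags
  let counts := bCounts dataSource tagset
  let buckets := bBuckets counts
  let ordered := (PySem.List.sorted buckets.keys (fun c => c) true).flatMap (fun c => buckets.getD c [])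
  PySem.List.slice ordered none (some 10)

-- ===== PRECONDITION & SPEC =====
-- Pre_ excludes only inputs containing an empty record, on which Python A raises IndexError at data[0].
def Pre_solution (dataSource : List (List String)) (tags : List String) : Prop :=
  ∀ data ∈ dataSource, data ≠ []
instance (dataSource : List (List String)) (tags : List String) : Decidable (Pre_solution dataSource tags) := by unfold Pre_solution; infer_instance
def pvWitness_solution : List (List String) × List String := ([["a", "x"], ["b", "y"]], ["x", "y"])

def Spec_solution (dataSource : List (List String)) (tags : List String) (out : List String) : Prop := out = solution_alt dataSource tags
instance (dataSource : List (List String)) (tags : List String) (out : List String) : Decidable (Spec_solution dataSource tags out) := by unfold Spec_solution; infer_instance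

-- ===== CLAIM (what is proved, stated in full; the proofs are below) =====
def Claim_equal_solution : Prop := ∀ (dataSource : List (List String)) (tags : List String), Dom_solution dataSource tags → Pre_solution dataSource tags → Spec_solution dataSource tags (solution dataSource tags)

-- ===== LEMMAS AND PROOFS =====

-- A's inner loop increments one fixed, already-present key
lemma foldl_insert_inc {p : Int → Bool} (l : List Int) (d : PySem.Dict String Int) (k : String) (v : Int) :
    l.foldl (fun d i => if p i then d.insert k (d.getD k 0 + 1) else d) (d.insert k v)
      = d.insert k (v + (l.countP p : Int)) := by
  induction l generalizing v with
  | nil => simp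
  | cons i is ih =>
    simp only [List.foldl_cons]
    by_cases hp : p i
    · rw [if_pos hp, PySem.Dict.getD_insert_self, PySem.Dict.insert_insert_self, ih]
      rw [List.countP_cons, if_pos hp]
      push_cast
      ring_nf
    · rw [if_neg hp, ih, List.countP_cons, if_neg hp]
      simp

lemma map_pyGetD_pyRange_one (data : List String) :
    (PySem.List.pyRange 1 (PySem.List.len data)).map (fun i => PySem.List.pyGetD data i "") = data.tail := by
  cases data with
  | nil => simp [PySem.List.pyRange, PySem.List.len]
  | cons x xs =>
    have h0 : (0:Int) < PySem.List.len (x :: xs) := by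
      simp [PySem.List.len]
    have := PySem.List.map_pyGetD_pyRange_zero (x :: xs) ""
    rw [PySem.List.pyRange_one_cons h0] at this
    simp only [List.map_cons] at this
    have hx : PySem.List.pyGetD (x :: xs) 0 "" = x := by simp [pysem]
    rw [hx, show (0:Int)+1 = 1 by ring] at this
    exact (List.cons.injEq _ _ _ _).mp this |>.2

-- the two counting loops build the same dict
lemma aDict_eq_bCounts (dataSource : List (List String)) (tags : List String) :
    aDict dataSource tags = bCounts dataSource (PySem.Set.ofList tags) := by
  unfold aDict bCounts
  congr 1
  funext d data
  rw [foldl_insert_inc (p := fun i => tags.contains (PySem.List.pyGetD data i ""))]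
  rw [PySem.List.foldl_if_add_one (p := fun x => PySem.Set.contains (PySem.Set.ofList tags) x)]
  congr 1
  rw [zero_add, zero_add]
  congr 1
  rw [show (fun i => tags.contains (PySem.List.pyGetD data i ""))
        = ((fun x => tags.contains x) ∘ (fun i => PySem.List.pyGetD data i "")) from rfl,
     ← List.countP_map, map_pyGetD_pyRange_one]
  rw [PySem.List.slice_from data (by norm_num)]
  have : List.drop (1:Int).toNat data = data.tail := by simp
  rw [this]
  apply List.countP_congr
  intro x _
  simp

-- insertBy facts for the bucket decomposition
lemma insertBy_append_no {α : Type} (before : α → α → Bool) (x : α) (l r : List α)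
    (h : ∀ y ∈ l, before x y = false) :
    PySem.List.insertBy before x (l ++ r) = l ++ PySem.List.insertBy before x r := by
  induction l with
  | nil => simp
  | cons y ys ih =>
    simp only [List.cons_append, PySem.List.insertBy]
    rw [h y (by simp), ih (fun z hz => h z (by simp [hz]))]
    simp

lemma insertBy_all_before {α : Type} (before : α → α → Bool) (x : α) (r : List α)
    (h : ∀ y ∈ r, before x y = true) :
    PySem.List.insertBy before x r = x :: r := by
  cases r with
  | nil => simp [PySem.List.insertBy]
  | cons y ys =>
    simp only [PySem.List.insertBy]
    rw [h y (by simp)]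
    simp

lemma insertBy_flat (cs : List Int) (hcs : cs.Pairwise (fun a b => b < a))
    (bs : Int → List (String × Int)) (hb : ∀ c ∈ cs, ∀ p ∈ bs c, p.2 = c)
    (x : String × Int) (hx : x.2 ∈ cs) :
    PySem.List.insertBy (fun a b => decide (b.2 < a.2)) x (cs.flatMap bs)
      = cs.flatMap (fun c => if c = x.2 then bs c ++ [x] else bs c) := by
  induction cs with
  | nil => simp at hx
  | cons c cs' ih =>
    rw [List.pairwise_cons] at hcs
    simp only [List.flatMap_cons]
    by_cases hc : c = x.2
    · rw [insertBy_append_no _ _ _ _ (fun y hy => by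
        have h1 : y.2 = c := hb c (by simp) y hy
        simp [h1, hc])]
      rw [insertBy_all_before _ _ _ (fun y hy => by
        simp only [List.mem_flatMap] at hy
        obtain ⟨c', hc', hy'⟩ := hy
        have h1 : y.2 = c' := hb c' (by simp [hc']) y hy'
        have h2 : c' < c := hcs.1 c' hc'
        simp [h1, ← hc, h2])]
      rw [if_pos hc]
      have hrest : List.flatMap (fun c' => if c' = x.2 then bs c' ++ [x] else bs c') cs'
          = List.flatMap bs cs' := by
        apply List.flatMap_congr
        intro c' hc'
        have h2 : c' < c := hcs.1 c' hc'
        rw [if_neg (by omega)]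
      rw [hrest]
      simp
    · have hx' : x.2 ∈ cs' := by
        rcases List.mem_cons.mp hx with h | h
        · exact absurd h.symm hc
        · exact h
      have h2 : x.2 < c := hcs.1 x.2 hx'
      rw [insertBy_append_no _ _ _ _ (fun y hy => by
        have h1 : y.2 = c := hb c (by simp) y hy
        simp [h1]
        omega)]
      rw [ih hcs.2 (fun c' hc' => hb c' (by simp [hc'])) hx']
      rw [if_neg hc]

-- A's stable reverse sort by count = buckets flattened in strictly decreasing count order
lemma sorted_rev_eq_flat_buckets (xs : List (String × Int)) (cs : List Int)
    (hcs : cs.Pairwise (fun a b => b < a)) (hmem : ∀ p ∈ xs, p.2 ∈ cs) :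
    PySem.List.sorted xs (fun p => p.2) true = cs.flatMap (fun c => xs.filter (fun p => p.2 == c)) := by
  rw [PySem.List.sorted_rev_eq_foldl_insertBy]
  induction xs using List.reverseRecOn with
  | nil => simp
  | append_singleton ys x ih =>
    rw [List.foldl_append, List.foldl_cons, List.foldl_nil,
        ih (fun p hp => hmem p (by simp [hp]))]
    rw [insertBy_flat cs hcs _ (fun c hc p hp => by
        simp only [List.mem_filter] at hp
        exact by simpa using hp.2)
      x (hmem x (by simp))]
    apply List.flatMap_congr
    intro c hc
    rw [List.filter_append]
    by_cases hxc : c = x.2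
    · rw [if_pos hxc]
      simp [hxc]
    · rw [if_neg hxc]
      have : (x.2 == c) = false := by simp; omega
      simp [this]

-- ===== VERDICT (by name: the statement is the Claim_ definition above) =====
theorem solution_spec : Claim_equal_solution := by
  intro dataSource tags _ _
  unfold Spec_solution
  -- shared data
  set m := bCounts dataSource (PySem.Set.ofList tags) with hm
  set nonzero := m.items.filter (fun p => decide (p.2 ≠ 0)) with hnz
  -- keys of m are nodup
  have hmkeys : m.keys.Nodup := by
    rw [hm]
    unfold bCounts
    exact PySem.Dict.nodup_keys_foldl_insert_key _ (fun data => PySem.List.pyGetD data 0 "") _ _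
      (by rw [PySem.Dict.keys_empty]; exact List.nodup_nil)
  -- first components of nonzero are nodup
  have hnzfst : (nonzero.map Prod.fst).Nodup := by
    have hsub : (nonzero.map Prod.fst).Sublist (m.items.map Prod.fst) :=
      List.Sublist.map Prod.fst List.filter_sublist
    exact List.Nodup.sublist hsub hmkeys
  -- A's filtered dict has items exactly nonzero
  have hdic2 : (PySem.Dict.ofList nonzero).items = nonzero := by
    show ((nonzero.foldl (fun d p => d.insert p.1 p.2) PySem.Dict.empty)).items = nonzero
    rw [PySem.Dict.items_foldl_insert_fresh nonzero Prod.fst Prod.snd PySem.Dict.empty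
      (fun a _ => PySem.Dict.contains_empty _) hnzfst]
    simp [PySem.Dict.empty]
  -- B's bucket dict
  have hbk : bBuckets m = (nonzero.map Prod.swap).foldl
      (fun b q => b.modify q.1 [] (fun l => l ++ [q.2])) PySem.Dict.empty := by
    unfold bBuckets
    rw [PySem.List.foldl_ite_eq_foldl_filter
      (p := fun q : String × Int => q.2 ≠ 0)
      (f := fun (b : PySem.Dict Int (List String)) q => b.modify q.2 [] (fun l => l ++ [q.1]))]
    rw [List.foldl_map]
    rfl
  have hget : ∀ c : Int, (bBuckets m).getD c []
      = (nonzero.filter (fun p => p.2 == c)).map Prod.fst := by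
    intro c
    rw [hbk, PySem.Dict.getD_foldl_modify_append]
    rw [List.filter_map, List.map_map]
    have : ((fun q : Int × String => q.1 == c) ∘ Prod.swap) = fun p : String × Int => p.2 == c := rfl
    rw [this]
    simp [Function.comp]
  have hkeysbk : (bBuckets m).keys = PySem.Set.ofList (nonzero.map Prod.snd) := by
    rw [hbk]
    rw [PySem.Dict.keys_foldl_modify_key (nonzero.map Prod.swap) Prod.fst []
      (fun _ q => fun l => l ++ [q.2]) PySem.Dict.empty]
    rw [PySem.Dict.keys_empty, PySem.Set.update_nil_left, List.map_map]
    rfl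
  -- cs is strictly decreasing and covers nonzero's counts
  set cs := PySem.List.sorted (bBuckets m).keys (fun c => c) true with hcs'
  have hcsnd : cs.Nodup := by
    rw [hcs']
    exact (PySem.List.sorted_perm _ _ _).nodup_iff.mpr
      (by rw [hkeysbk]; exact PySem.Set.nodup_ofList _)
  have hcsge : cs.Pairwise (fun a b => b ≤ a) := PySem.List.sorted_pairwise_rev _ _
  have hcslt : cs.Pairwise (fun a b => b < a) :=
    (hcsge.and hcsnd).imp (fun h => lt_of_le_of_ne h.1 (fun he => h.2 he.symm))
  have hcov : ∀ p ∈ nonzero, p.2 ∈ cs := by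
    intro p hp
    rw [hcs', PySem.List.mem_sorted, hkeysbk, PySem.Set.mem_ofList]
    exact List.mem_map.mpr ⟨p, hp, rfl⟩
  -- the sorted survivors decompose into buckets
  have hmain : PySem.List.sorted nonzero (fun p => p.2) true
      = cs.flatMap (fun c => nonzero.filter (fun p => p.2 == c)) :=
    sorted_rev_eq_flat_buckets nonzero cs hcslt hcov
  -- assemble both sides
  unfold solution solution_alt
  rw [aDict_eq_bCounts]
  simp only [← hm, ← hnz, ← hcs', hdic2]
  rw [PySem.List.foldl_append_singleton_eq_map Prod.fst]
  rw [List.nil_append]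
  -- A's truncation = take 10
  have htrunc : ∀ (S : List (String × Int)),
      (if 10 < S.length then PySem.List.slice S none (some 10) else S) = S.take 10 := by
    intro S
    by_cases h : 10 < S.length
    · rw [if_pos h, PySem.List.slice_to S (by norm_num)]
      rfl
    · rw [if_neg h, List.take_of_length_le (by omega)]
  rw [htrunc, List.map_take, hmain, List.map_flatMap]
  rw [PySem.List.slice_to _ (by norm_num)]
  rw [show ((10:Int)).toNat = 10 from rfl]
  congr 1
  apply List.flatMap_congr
  intro c hc
  rw [hget c]
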